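-- pv_equiv track=rewrite | github.com/TarunSaini063/Coding | codeforces_python/no_heap.py | solve
-- ===== SOURCE A (Python) =====
-- MOD = 10**9+7
--
-- def comb(r,n) :
--         if 2*r > n :
--             return comb(n-r,n)
--         c = 1
--         for i in range(r) :
--             c = c*(n-i)//(i+1)
--         return c
--
-- def solve( A):
--         ans,h = [1,1], 0
--         for n in range(2,A+1) :
--             if 2<<h <= n :
--                 h += 1
--             m = n-(1<<h)+1
--             l = (1<<(h-1))-1 + min(m,1<<(h-1))
--             r = (1<<(h-1))-1 + max(0,m-(1<<(h-1)))
--             ans.append((comb(l,n-1)*ans[l]*ans[r])%MOD)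
--         return ans[A]
-- ===== SOURCE B (Python) =====
-- MOD = 10**9 + 7
--
-- def solve(A):
--     dp = [1, 1]
--     row = [1, 1]                      # row = [C(n-1,i) % MOD for i in 0..n-1], the Pascal row
--     for n in range(2, A + 1):
--         h = n.bit_length() - 1        # heap height: 2**h <= n < 2**(h+1)
--         m = n - (1 << h) + 1          # nodes on the last level
--         half = 1 << (h - 1)
--         l = half - 1 + min(m, half)   # left-subtree size
--         r = n - 1 - l                 # right subtree takes the rest
--         dp.append(row[l] * dp[l] % MOD * dp[r] % MOD)
--         # advance the Pascal row from n-1 to n (additive recurrence, no division)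
--         row = [1] + [(row[i - 1] + row[i]) % MOD for i in range(1, n)] + [1]
--     return dp[A]
-- ===== Notes on version B (the rewrite author's own statement) =====
-- stated objective: alternative
-- what changed: B eliminates A's recursive comb helper and its exact-division loops entirely: it maintains the current Pascal's-triangle row modulo MOD across iterations (additive recurrence C(n,i)=C(n-1,i-1)+C(n-1,i), all values < MOD, no bigints, no division), reads the needed binomial from that row, and gets the height by bit_length and the right-subtree size as the complement n-1-l.
-- outside the precondition, e.g. on solve(-3): A raises IndexError, B raises IndexError
import Mathlib
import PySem

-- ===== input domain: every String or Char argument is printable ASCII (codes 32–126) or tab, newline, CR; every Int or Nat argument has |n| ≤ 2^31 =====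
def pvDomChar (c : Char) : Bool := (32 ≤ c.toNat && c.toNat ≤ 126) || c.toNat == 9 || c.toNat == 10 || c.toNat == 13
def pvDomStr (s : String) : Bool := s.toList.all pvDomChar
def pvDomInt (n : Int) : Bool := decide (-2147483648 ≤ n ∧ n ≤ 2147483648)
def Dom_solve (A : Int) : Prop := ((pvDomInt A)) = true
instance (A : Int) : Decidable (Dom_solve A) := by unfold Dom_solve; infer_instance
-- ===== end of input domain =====

-- B replaces A's recursive comb helper and its exact-division loops by a Pascal's-triangle
-- row maintained modulo MOD across iterations (additive recurrence, no division), with the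
-- height from bit_length and the right subtree as the complement n-1-l (objective:
-- alternative — modular word additions instead of exact bigint multiply/divide).

def MOD : Int := 10 ^ 9 + 7

-- ===== PORT A =====
-- the 'for i in range(r)' loop inside comb
def combLoop (r n : Int) : Int :=
  (PySem.List.pyRange 0 r 1).foldl (fun c i => PySem.Int.floordiv (c * (n - i)) (i + 1)) 1

def comb (r n : Int) : Int :=
  if 2 * r > n then comb (n - r) n
  else combLoop r n
termination_by (2 * r - n).toNat
decreasing_by omega

-- loop body of A's 'for n in range(2, A+1)'; state = (ans, h).  In A the shift counts h, h-1
-- are always ≥ 0 when used (h becomes 1 on the first iteration), so '.toNat' is exact there.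
def stepA (st : List Int × Int) (n : Int) : List Int × Int :=
  let h : Int := if (2:Int) <<< st.2.toNat ≤ n then st.2 + 1 else st.2
  let m : Int := n - ((1:Int) <<< h.toNat) + 1
  let l : Int := ((1:Int) <<< (h-1).toNat) - 1 + min m ((1:Int) <<< (h-1).toNat)
  let r : Int := ((1:Int) <<< (h-1).toNat) - 1 + max 0 (m - ((1:Int) <<< (h-1).toNat))
  (st.1 ++ [PySem.Int.mod (comb l (n-1) * PySem.List.pyGetD st.1 l 0 * PySem.List.pyGetD st.1 r 0) MOD], h)

def solve (A : Int) : Int :=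
  let st := (PySem.List.pyRange 2 (A+1) 1).foldl stepA ([1, 1], 0)
  PySem.List.pyGetD st.1 A 0    -- ans[A]; in range whenever -2 ≤ A (Pre_), so the default is never taken there

-- ===== PORT B =====
-- loop body of B's 'for n in range(2, A+1)'; state = (dp, row); h = n.bit_length()-1 ≥ 1 for
-- n ≥ 2, so '.toNat' is exact.  The row comprehension is ported as map over the range.
def stepB (st : List Int × List Int) (n : Int) : List Int × List Int :=
  let h : Int := (PySem.Int.bitLength n : Int) - 1
  let m : Int := n - ((1:Int) <<< h.toNat) + 1
  let half : Int := (1:Int) <<< (h-1).toNat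
  let l : Int := half - 1 + min m half
  let r : Int := n - 1 - l
  let dp' := st.1 ++ [PySem.Int.mod (PySem.Int.mod (PySem.List.pyGetD st.2 l 0 * PySem.List.pyGetD st.1 l 0) MOD * PySem.List.pyGetD st.1 r 0) MOD]
  let row' := [1] ++ (PySem.List.pyRange 1 n 1).map
      (fun i => PySem.Int.mod (PySem.List.pyGetD st.2 (i-1) 0 + PySem.List.pyGetD st.2 i 0) MOD) ++ [1]
  (dp', row')

def solve_alt (A : Int) : Int :=
  PySem.List.pyGetD ((PySem.List.pyRange 2 (A+1) 1).foldl stepB ([1, 1], [1, 1])).1 A 0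

-- ===== PRECONDITION & SPEC =====
-- Pre_ excludes exactly A ≤ -3, where Python's ans[A] raises IndexError (both in A and in B).
def Pre_solve (A : Int) : Prop := -2 ≤ A
instance (A : Int) : Decidable (Pre_solve A) := by unfold Pre_solve; infer_instance
def pvWitness_solve : Int := 4

def Spec_solve (A : Int) (out : Int) : Prop := out = solve_alt A
instance (A : Int) (out : Int) : Decidable (Spec_solve A out) := by unfold Spec_solve; infer_instance

-- ===== CLAIM (what is proved, stated in full; the proofs are below) =====
def Claim_equal_solve : Prop := ∀ (A : Int), Dom_solve A → Pre_solve A → Spec_solve A (solve A)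

-- ===== LEMMAS AND PROOFS =====

-- the mathematical Pascal row: rowOf k = [C(k,i) % MOD for i in 0..k]
def rowOf (k : Nat) : List Int :=
  (List.range (k+1)).map (fun i => ((k.choose i % 1000000007 : Nat) : Int))

lemma rowGet (k i : Nat) (hi : i ≤ k) :
    PySem.List.pyGetD (rowOf k) (i : Int) 0 = ((k.choose i % 1000000007 : Nat) : Int) := by
  rw [PySem.List.pyGetD_natCast]
  unfold rowOf
  rw [List.getD_eq_getElem?_getD, List.getElem?_map, List.getElem?_range (by omega)]
  rfl

lemma combLoop_eq (n r : Nat) (h : r ≤ n) : combLoop (r : Int) (n : Int) = (n.choose r : Int) := by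
  induction r with
  | zero =>
      simp [combLoop, PySem.List.pyRange_one_eq_nil]
  | succ r ih =>
      have hr : r ≤ n := by omega
      have hrn : r < n := by omega
      unfold combLoop at *
      rw [show ((r + 1 : Nat) : Int) = (r : Int) + 1 by push_cast; ring,
          PySem.List.pyRange_one_succ_right (by positivity), List.foldl_append, ih hr]
      simp only [List.foldl_cons, List.foldl_nil]
      have hsub : (n : Int) - (r : Int) = ((n - r : Nat) : Int) := by push_cast [hrn.le]; ring
      rw [hsub, show ((n.choose r : Int)) * ((n - r : Nat) : Int) = ((n.choose r * (n - r) : Nat) : Int) by push_cast; ring,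
          show ((r : Int) + 1) = ((r + 1 : Nat) : Int) by push_cast; ring,
          PySem.Int.floordiv_natCast]
      have : n.choose r * (n - r) = n.choose (r+1) * (r+1) := (Nat.choose_succ_right_eq n r).symm
      rw [this, Nat.mul_div_cancel _ (by omega)]

lemma comb_eq (n r : Nat) (h : r ≤ n) : comb (r : Int) (n : Int) = (n.choose r : Int) := by
  rw [comb]
  by_cases hc : 2 * (r : Int) > (n : Int)
  · rw [if_pos hc]
    have hsub : (n : Int) - (r : Int) = ((n - r : Nat) : Int) := by push_cast [h]; ring
    rw [hsub, comb, if_neg (by omega),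
        combLoop_eq n (n - r) (by omega), Nat.choose_symm h]
  · rw [if_neg hc, combLoop_eq n r h]

lemma bitLength_eq (n : Nat) (h : 1 ≤ n) : PySem.Int.bitLength (n : Int) = Nat.log 2 n + 1 := by
  induction n using Nat.strong_induction_on with
  | _ n ih =>
    by_cases h2 : n < 2
    · interval_cases n
      · decide
    · rw [PySem.Int.bitLength_natCast (by omega),
          ih (n / 2) (by omega) (by omega)]
      have hlog : Nat.log 2 (n / 2) = Nat.log 2 n - 1 := Nat.log_div_base 2 n
      have h1log : 1 ≤ Nat.log 2 n :=
        (Nat.le_log_iff_pow_le (by norm_num) (by omega : n ≠ 0)).2 (by omega)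
      omega

lemma logstep (k : Nat) (h : 1 ≤ k) :
    Nat.log 2 (k+1) = if 2 ^ (Nat.log 2 k + 1) ≤ k + 1 then Nat.log 2 k + 1 else Nat.log 2 k := by
  have p1 : 2 ^ Nat.log 2 k ≤ k := Nat.pow_log_le_self 2 (by omega)
  have p2 : k < 2 ^ (Nat.log 2 k + 1) := Nat.lt_pow_succ_log_self (by norm_num) k
  split_ifs with hc
  · exact Nat.log_eq_of_pow_le_of_lt_pow hc
      (by
        have : 2 ^ (Nat.log 2 k + 1) < 2 ^ (Nat.log 2 k + 2) :=
          Nat.pow_lt_pow_right (by norm_num) (by omega)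
        omega)
  · exact Nat.log_eq_of_pow_le_of_lt_pow (by omega) (by omega)

-- pyRange 1 (k+1) 1 as a mapped List.range
lemma pyRange_one_map (k : Nat) :
    PySem.List.pyRange 1 ((k : Int) + 1) 1 = (List.range k).map (fun j : Nat => ((j : Int) + 1)) := by
  induction k with
  | zero => rw [PySem.List.pyRange_one_eq_nil (by norm_num)]; simp
  | succ k ih =>
      rw [show (((k + 1 : Nat) : Int) + 1) = ((k : Int) + 1) + 1 by push_cast; ring,
          PySem.List.pyRange_one_succ_right (by omega), ih]
      simp [List.range_succ]

-- B's row update advances the Pascal row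
lemma rowStep (k : Nat) :
    [(1:Int)] ++ (PySem.List.pyRange 1 ((k : Int) + 1) 1).map
        (fun i => PySem.Int.mod (PySem.List.pyGetD (rowOf k) (i-1) 0 + PySem.List.pyGetD (rowOf k) i 0) MOD) ++ [1]
      = rowOf (k+1) := by
  have hMOD : MOD = ((1000000007 : Nat) : Int) := by unfold MOD; norm_num
  rw [pyRange_one_map]
  have hmid : ∀ j ∈ List.range k,
      ((fun i => PySem.Int.mod (PySem.List.pyGetD (rowOf k) (i-1) 0 + PySem.List.pyGetD (rowOf k) i 0) MOD)
        ∘ (fun j : Nat => ((j : Int) + 1))) j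
        = (((k+1).choose (j+1) % 1000000007 : Nat) : Int) := by
    intro j hj
    have hjk : j < k := List.mem_range.mp hj
    simp only [Function.comp]
    rw [show ((j : Int) + 1 - 1) = (j : Int) by ring,
        show ((j : Int) + 1) = ((j + 1 : Nat) : Int) by push_cast; ring,
        rowGet k j (by omega), rowGet k (j+1) (by omega),
        show (((k.choose j % 1000000007 : Nat) : Int) + ((k.choose (j+1) % 1000000007 : Nat) : Int))
            = (((k.choose j % 1000000007 + k.choose (j+1) % 1000000007 : Nat)) : Int) by push_cast; ring,
        hMOD, PySem.Int.mod_natCast]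
    congr 1
    rw [← Nat.add_mod, Nat.choose_succ_succ]
  rw [List.map_map, List.map_congr_left hmid]
  unfold rowOf
  rw [show k + 1 + 1 = (k + 1) + 1 from rfl, List.range_succ, List.map_append,
      List.range_succ_eq_map, List.map_cons, List.map_map]
  simp [Nat.choose_self, Nat.mod_eq_of_lt]

-- modular product identity used to compare A's and B's appended values
lemma modarith (x a b : Int) :
    ((x % MOD * a) % MOD * b) % MOD = (x * a * b) % MOD := by
  have h0 : x % MOD ≡ x [ZMOD MOD] := Int.emod_emod_of_dvd x dvd_rfl
  have h2 : (x % MOD * a) % MOD ≡ x % MOD * a [ZMOD MOD] := Int.emod_emod_of_dvd _ dvd_rfl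
  exact (h2.trans (h0.mul_right a)).mul_right b

lemma stepAB (k : Nat) (hk : 1 ≤ k) (d : List Int) :
    stepA (d, (Nat.log 2 k : Int)) ((k : Int) + 1)
      = ((stepB (d, rowOf k) ((k : Int) + 1)).1, (Nat.log 2 (k+1) : Int))
    ∧ (stepB (d, rowOf k) ((k : Int) + 1)).2 = rowOf (k+1) := by
  have hMOD : MOD = ((1000000007 : Nat) : Int) := by unfold MOD; norm_num
  have hMODpos : (0:Int) < MOD := by unfold MOD; norm_num
  have hk1 : ((k : Int) + 1) = ((k + 1 : Nat) : Int) := by push_cast; ring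
  set h1 : Nat := Nat.log 2 (k + 1) with hh1
  have h1pos : 1 ≤ h1 :=
    (Nat.le_log_iff_pow_le (by norm_num) (by omega : k + 1 ≠ 0)).2 (by omega)
  -- A's maintained height update equals the closed-form height
  have hAh : (if (2:Int) <<< ((Nat.log 2 k : Int)).toNat ≤ (k : Int) + 1
        then (Nat.log 2 k : Int) + 1 else (Nat.log 2 k : Int)) = (h1 : Int) := by
    rw [Int.toNat_natCast, Int.shiftLeft_eq]
    have hcond : ((2:Int) * 2 ^ Nat.log 2 k ≤ (k : Int) + 1) ↔ (2 ^ (Nat.log 2 k + 1) ≤ k + 1) := by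
      rw [pow_succ]
      constructor <;> intro hx <;> [exact_mod_cast (by push_cast at hx ⊢; linarith : ((2:Int) ^ Nat.log 2 k * 2 ≤ (k:Int)+1)); (push_cast; linarith [(by exact_mod_cast hx : ((2:Int) ^ Nat.log 2 k * 2 ≤ (k:Int)+1))])]
    rw [hh1, logstep k hk]
    by_cases hc : 2 ^ (Nat.log 2 k + 1) ≤ k + 1
    · rw [if_pos (hcond.mpr hc), if_pos hc]; push_cast; ring
    · rw [if_neg (fun hx => hc (hcond.mp hx)), if_neg hc]
  -- B's bit_length height equals the same
  have hBh : ((PySem.Int.bitLength ((k : Int) + 1) : Nat) : Int) - 1 = (h1 : Int) := by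
    rw [hk1, bitLength_eq (k+1) (by omega)]
    push_cast
    ring
  refine ⟨?_, ?_⟩
  · simp only [stepA, stepB, hAh, hBh]
    rw [show ((h1 : Int)).toNat = h1 from Int.toNat_natCast h1,
        show ((h1 : Int) - 1).toNat = h1 - 1 by omega,
        Int.shiftLeft_eq, Int.shiftLeft_eq, one_mul, one_mul]
    have hcpos : (1:Int) ≤ 2 ^ (h1 - 1) := one_le_pow₀ (by norm_num)
    have h2c : (2:Int) ^ h1 = 2 * 2 ^ (h1 - 1) := by
      have he : (2:Int) ^ h1 = 2 ^ ((h1 - 1) + 1) := by congr 1; omega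
      rw [he, pow_succ]; ring
    have hlow : (2:Int) ^ h1 ≤ (k : Int) + 1 := by
      have := Nat.pow_log_le_self 2 (by omega : k + 1 ≠ 0)
      rw [hk1]; exact_mod_cast this
    have hhigh : (k : Int) + 1 < 2 * 2 ^ h1 := by
      have h0 := Nat.lt_pow_succ_log_self (by norm_num : 1 < 2) (k+1)
      rw [pow_succ] at h0
      have h0' : ((k + 1 : Nat) : Int) < ((2 ^ h1 * 2 : Nat) : Int) := by exact_mod_cast h0
      push_cast at h0'
      rw [hk1]; push_cast; linarith
    set c : Int := 2 ^ (h1 - 1) with hc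
    rw [h2c]
    set m : Int := (k : Int) + 1 - 2 * c + 1 with hm
    set l : Int := c - 1 + min m c with hl
    -- the two right-subtree sizes agree, and l is a valid left size
    have hr : c - 1 + max 0 (m - c) = (k : Int) + 1 - 1 - l := by
      rw [hl, hm]; omega
    have hlb : 0 ≤ l ∧ l ≤ (k : Int) := by rw [hl, hm]; omega
    have hL : l = ((l.toNat : Nat) : Int) := by omega
    have hLk : l.toNat ≤ k := by omega
    -- A's comb computes the binomial exactly; B reads it (reduced) from the Pascal row
    have hcomb : comb l ((k : Int) + 1 - 1) = (Nat.choose k l.toNat : Int) := by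
      rw [show (k : Int) + 1 - 1 = (k : Int) by ring, hL, comb_eq k l.toNat hLk, Int.toNat_natCast]
    have hrow : PySem.List.pyGetD (rowOf k) l 0 = (Nat.choose k l.toNat : Int) % MOD := by
      rw [hL, rowGet k l.toNat hLk, hMOD]
      push_cast
      rfl
    rw [hr, hcomb, hrow,
        PySem.Int.mod_eq_emod_of_pos hMODpos, PySem.Int.mod_eq_emod_of_pos hMODpos,
        PySem.Int.mod_eq_emod_of_pos hMODpos, modarith]
  · simp only [stepB]
    exact rowStep k

lemma mainLoop (k : Nat) (hk : 1 ≤ k) :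
    (PySem.List.pyRange 2 ((k : Int) + 1) 1).foldl stepA ([1, 1], 0)
      = (((PySem.List.pyRange 2 ((k : Int) + 1) 1).foldl stepB ([1, 1], [1, 1])).1, (Nat.log 2 k : Int))
    ∧ ((PySem.List.pyRange 2 ((k : Int) + 1) 1).foldl stepB ([1, 1], [1, 1])).2 = rowOf k := by
  induction k, hk using Nat.le_induction with
  | base =>
      rw [PySem.List.pyRange_one_eq_nil (by norm_num)]
      refine ⟨by simp, ?_⟩
      simp [rowOf, List.range_succ]
  | succ k hk ih =>
      have hsplit : PySem.List.pyRange 2 (((k + 1 : Nat) : Int) + 1) 1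
          = PySem.List.pyRange 2 ((k : Int) + 1) 1 ++ [(k : Int) + 1] := by
        rw [show (((k + 1 : Nat) : Int) + 1) = ((k : Int) + 1) + 1 by push_cast; ring]
        exact PySem.List.pyRange_one_succ_right (by omega)
      obtain ⟨ih1, ih2⟩ := ih
      obtain ⟨sAB, sRow⟩ := stepAB k hk ((PySem.List.pyRange 2 ((k : Int) + 1) 1).foldl stepB ([1, 1], [1, 1])).1
      constructor
      · rw [hsplit, List.foldl_append, List.foldl_append, ih1,
            List.foldl_cons, List.foldl_nil, List.foldl_cons, List.foldl_nil, sAB]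
        congr 1
        rw [show ((PySem.List.pyRange 2 ((k:Int)+1) 1).foldl stepB ([1,1],[1,1]))
              = (((PySem.List.pyRange 2 ((k:Int)+1) 1).foldl stepB ([1,1],[1,1])).1,
                 ((PySem.List.pyRange 2 ((k:Int)+1) 1).foldl stepB ([1,1],[1,1])).2) from rfl, ih2]
      · rw [hsplit, List.foldl_append, List.foldl_cons, List.foldl_nil,
            show ((PySem.List.pyRange 2 ((k:Int)+1) 1).foldl stepB ([1,1],[1,1]))
              = (((PySem.List.pyRange 2 ((k:Int)+1) 1).foldl stepB ([1,1],[1,1])).1,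
                 ((PySem.List.pyRange 2 ((k:Int)+1) 1).foldl stepB ([1,1],[1,1])).2) from rfl, ih2, sRow]

-- ===== VERDICT (by name: the statement is the Claim_ definition above) =====
theorem solve_spec : Claim_equal_solve := by
  intro A _ _
  unfold Spec_solve solve solve_alt
  by_cases hA : A ≤ 1
  · rw [PySem.List.pyRange_one_eq_nil (by omega : A + 1 ≤ 2)]
    rfl
  · have hk : A = ((A.toNat : Int)) := by omega
    rw [hk, (mainLoop A.toNat (by omega)).1]
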